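-- pv_equiv track=rewrite | github.com/trisharayan/trisharayan.github.io | crossword_part1.py | findSpaces
-- ===== SOURCE A (Python) =====
-- def findSpaces(grid, xheight, xwidth):
--    spaceList = []
--    ind = 0
--    for row in range(xheight):
--       for col in range(xwidth):
--          if grid[row][col]==0:
--             spaceList.append(ind)
--          ind = ind+1
--    return spaceList
-- ===== SOURCE B (Python) =====
-- def findSpaces(grid, xheight, xwidth):
--     if xheight <= 0 or xwidth <= 0:
--         return []
--     return [ind for ind in range(xheight * xwidth)
--             if grid[ind // xwidth][ind % xwidth] == 0]
-- ===== Notes on version B (the rewrite author's own statement) =====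
-- stated objective: simpler
-- what changed: Replaces the nested row/column loops with a running counter by a single flat comprehension over range(xheight*xwidth), recovering the cell with divmod-style index arithmetic (ind // xwidth, ind % xwidth).
import Mathlib
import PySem

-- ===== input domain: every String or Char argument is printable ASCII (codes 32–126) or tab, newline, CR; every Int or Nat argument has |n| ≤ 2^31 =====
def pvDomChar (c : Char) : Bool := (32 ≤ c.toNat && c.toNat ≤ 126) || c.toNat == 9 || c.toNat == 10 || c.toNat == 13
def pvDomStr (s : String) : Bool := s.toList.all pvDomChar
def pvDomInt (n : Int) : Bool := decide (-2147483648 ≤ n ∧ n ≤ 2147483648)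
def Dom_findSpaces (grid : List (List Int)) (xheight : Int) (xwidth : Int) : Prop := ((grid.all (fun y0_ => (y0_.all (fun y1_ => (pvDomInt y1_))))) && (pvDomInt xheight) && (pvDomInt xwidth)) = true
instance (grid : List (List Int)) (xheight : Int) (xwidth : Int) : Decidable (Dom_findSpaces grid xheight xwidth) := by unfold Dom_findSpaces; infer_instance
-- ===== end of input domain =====

-- B replaces the nested row/column loops and running counter by one flat pass
-- over range(xheight*xwidth) with divmod index arithmetic (objective: simpler).

-- ===== PORT A =====
-- cell access grid[row][col]: none = IndexError (excluded by Pre_)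
def pvCellA (grid : List (List Int)) (row col : Int) : Option Int :=
  (PySem.List.pyGet? grid row).bind (fun r => PySem.List.pyGet? r col)

def findSpaces (grid : List (List Int)) (xheight : Int) (xwidth : Int) : List Int :=
  (((PySem.List.pyRange 0 xheight 1).foldl (fun st row =>
      (PySem.List.pyRange 0 xwidth 1).foldl (fun (st : List Int × Int) col =>
        ((if pvCellA grid row col = some 0 then st.1 ++ [st.2] else st.1), st.2 + 1)) st)
    (([] : List Int), (0 : Int)))).1

-- ===== PORT B =====
def findSpaces_alt (grid : List (List Int)) (xheight : Int) (xwidth : Int) : List Int :=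
  if xheight ≤ 0 ∨ xwidth ≤ 0 then []
  else (PySem.List.pyRange 0 (xheight * xwidth) 1).filter (fun ind =>
    ((PySem.List.pyGet? grid (PySem.Int.floordiv ind xwidth)).bind
      (fun r => PySem.List.pyGet? r (PySem.Int.mod ind xwidth))) = some 0)

-- ===== PRECONDITION & SPEC =====
-- Pre_ excludes exactly the inputs where Python A raises IndexError: with
-- 0 < xwidth, A indexes grid[row][col] for every row < xheight, col < xwidth.
def Pre_findSpaces (grid : List (List Int)) (xheight : Int) (xwidth : Int) : Prop :=
  xwidth ≤ 0 ∨ (xheight ≤ (grid.length : Int) ∧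
    ∀ r ∈ grid.take xheight.toNat, xwidth ≤ (r.length : Int))

instance (grid : List (List Int)) (xheight : Int) (xwidth : Int) : Decidable (Pre_findSpaces grid xheight xwidth) := by unfold Pre_findSpaces; infer_instance

def pvWitness_findSpaces : List (List Int) × Int × Int := ([[0, 1], [1, 0]], 2, 2)

def Spec_findSpaces (grid : List (List Int)) (xheight : Int) (xwidth : Int) (out : List Int) : Prop := out = findSpaces_alt grid xheight xwidth
instance (grid : List (List Int)) (xheight : Int) (xwidth : Int) (out : List Int) : Decidable (Spec_findSpaces grid xheight xwidth out) := by unfold Spec_findSpaces; infer_instance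

-- ===== CLAIM (what is proved, stated in full; the proofs are below) =====
def Claim_equal_findSpaces : Prop := ∀ (grid : List (List Int)) (xheight : Int) (xwidth : Int), Dom_findSpaces grid xheight xwidth → Pre_findSpaces grid xheight xwidth → Spec_findSpaces grid xheight xwidth (findSpaces grid xheight xwidth)

-- ===== LEMMAS AND PROOFS =====

-- arithmetic bridge: for 0 ≤ col < xw, (row*xw + col) // xw = row and (row*xw + col) % xw = col
theorem pv_cell_bridge (grid : List (List Int)) (xw row col : Int)
    (hc0 : 0 ≤ col) (hcw : col < xw) :
    ((PySem.List.pyGet? grid (PySem.Int.floordiv (row * xw + col) xw)).bind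
      (fun r => PySem.List.pyGet? r (PySem.Int.mod (row * xw + col) xw)))
      = pvCellA grid row col := by
  have hw : 0 < xw := lt_of_le_of_lt hc0 hcw
  rw [PySem.Int.floordiv_eq_ediv_of_pos hw, PySem.Int.mod_eq_emod_of_pos hw]
  have h1 : (row * xw + col) / xw = row := by
    rw [add_comm, Int.add_mul_ediv_right _ _ (ne_of_gt hw), Int.ediv_eq_zero_of_lt hc0 hcw,
      zero_add]
  have h2 : (row * xw + col) % xw = col := by
    rw [add_comm, Int.add_mul_emod_self_right, Int.emod_eq_of_lt hc0 hcw]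
  rw [h1, h2]; rfl

-- inner loop: one row of A equals the flat filter over the corresponding index block
theorem pv_inner (grid : List (List Int)) (xw row : Int) (hw : 0 < xw) :
    ∀ (c : Int), 0 ≤ c → c ≤ xw → ∀ (acc : List Int),
    (PySem.List.pyRange c xw 1).foldl (fun (st : List Int × Int) col =>
        ((if pvCellA grid row col = some 0 then st.1 ++ [st.2] else st.1), st.2 + 1))
      (acc, row * xw + c)
    = (acc ++ (PySem.List.pyRange (row * xw + c) (row * xw + xw) 1).filter (fun ind =>
        ((PySem.List.pyGet? grid (PySem.Int.floordiv ind xw)).bind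
          (fun r => PySem.List.pyGet? r (PySem.Int.mod ind xw))) = some 0),
       row * xw + xw) := by
  intro c hc0 hcw
  induction hn : (xw - c).toNat generalizing c with
  | zero =>
    intro acc
    have hce : c = xw := by omega
    subst hce
    rw [PySem.List.pyRange_one_eq_nil le_rfl, PySem.List.pyRange_one_eq_nil le_rfl]
    simp [List.foldl]
  | succ n ih =>
    intro acc
    have hlt : c < xw := by omega
    rw [PySem.List.pyRange_one_cons hlt,
      PySem.List.pyRange_one_cons (by omega : row * xw + c < row * xw + xw)]
    simp only [List.foldl_cons, List.filter_cons]
    rw [pv_cell_bridge grid xw row c hc0 hlt]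
    by_cases hz : pvCellA grid row c = some 0
    · simp only [hz, decide_true, if_true]
      have := ih (c + 1) (by omega) (by omega) (by omega) (acc ++ [row * xw + c])
      rw [show row * xw + c + 1 = row * xw + (c + 1) by ring] at *
      rw [this, List.append_assoc, List.singleton_append]
    · simp only [hz, if_false, decide_false, Bool.false_eq_true]
      have := ih (c + 1) (by omega) (by omega) (by omega) acc
      rw [show row * xw + c + 1 = row * xw + (c + 1) by ring] at *
      rw [this]

-- outer loop: rows r..xheight of A equal the flat filter over indices r*xw..xheight*xw
theorem pv_outer (grid : List (List Int)) (xh xw : Int) (hw : 0 < xw) :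
    ∀ (r : Int), 0 ≤ r → r ≤ xh → ∀ (acc : List Int),
    (PySem.List.pyRange r xh 1).foldl (fun st row =>
        (PySem.List.pyRange 0 xw 1).foldl (fun (st : List Int × Int) col =>
          ((if pvCellA grid row col = some 0 then st.1 ++ [st.2] else st.1), st.2 + 1)) st)
      (acc, r * xw)
    = (acc ++ (PySem.List.pyRange (r * xw) (xh * xw) 1).filter (fun ind =>
        ((PySem.List.pyGet? grid (PySem.Int.floordiv ind xw)).bind
          (fun r => PySem.List.pyGet? r (PySem.Int.mod ind xw))) = some 0),
       xh * xw) := by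
  intro r hr0 hrh
  induction hn : (xh - r).toNat generalizing r with
  | zero =>
    intro acc
    have : r = xh := by omega
    subst this
    rw [PySem.List.pyRange_one_eq_nil le_rfl, PySem.List.pyRange_one_eq_nil le_rfl]
    simp [List.foldl]
  | succ n ih =>
    intro acc
    have hlt : r < xh := by omega
    rw [PySem.List.pyRange_one_cons hlt]
    simp only [List.foldl_cons]
    have hinner := pv_inner grid xw r hw 0 le_rfl (le_of_lt hw) acc
    rw [add_zero] at hinner
    rw [hinner]
    have hnext := ih (r + 1) (by omega) (by omega) (by omega)
      (acc ++ (PySem.List.pyRange (r * xw) (r * xw + xw) 1).filter (fun ind =>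
        ((PySem.List.pyGet? grid (PySem.Int.floordiv ind xw)).bind
          (fun r => PySem.List.pyGet? r (PySem.Int.mod ind xw))) = some 0))
    rw [show (r + 1) * xw = r * xw + xw by ring] at hnext
    rw [hnext, List.append_assoc, ← List.filter_append,
      ← PySem.List.pyRange_one_append (r * xw) (r * xw + xw) (xh * xw) (by nlinarith) (by nlinarith)]

-- ===== VERDICT (by name: the statement is the Claim_ definition above) =====
theorem findSpaces_spec : Claim_equal_findSpaces := by
  intro grid xh xw _ _
  unfold Spec_findSpaces findSpaces findSpaces_alt
  by_cases hdeg : xh ≤ 0 ∨ xw ≤ 0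
  · rw [if_pos hdeg]
    rcases hdeg with hh | hw
    · rw [PySem.List.pyRange_one_eq_nil hh]
      rfl
    · have : PySem.List.pyRange 0 xw 1 = [] := PySem.List.pyRange_one_eq_nil hw
      rw [this]
      simp only [List.foldl]
      induction PySem.List.pyRange 0 xh 1 with
      | nil => rfl
      | cons a l ih => simp only [List.foldl_cons]; exact ih
  · rw [if_neg hdeg]
    rw [not_or, not_le, not_le] at hdeg
    have hw : 0 < xw := hdeg.2
    have := pv_outer grid xh xw hw 0 le_rfl (le_of_lt hdeg.1) []
    rw [zero_mul] at this
    rw [this]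
    simp
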